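-- pv_equiv track=rewrite | github.com/fightj/algorithm | 25.10.19 n^2 배열 자르기.py | solution
-- ===== SOURCE A (Python) =====
-- def solution(n, left, right):
--     answer = []
--     arr = [[0]*n for _ in range(n)]
-- #초기에는 arr = [[0]*n] * n 이렇게 했는데, 이건 잘못된 것임.이건 같은 리스트 객체를 n번 참조하는 형태예요. 그래서
-- # arr[i][i] = i+1  -> [[1, 2, 3], [1, 2, 3], [1, 2, 3]] 이렇게 나오게 됨.
--
-- # 한 번 할 때마다 “i번째 열 전체”가 바뀝니다.
-- # i=0 → 첫 번째 열이 전부 1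
-- # i=1 → 두 번째 열이 전부 2
-- # i=2 → 세 번째 열이 전부 3
--
--     for i in range(n):
--         arr[i][i] = i+1
--         for j in range(i, -1, -1):
--             arr[i][j] = i + 1
--             arr[j][i] = i+ 1
--     lst = []
--     for i in range(n):
--         for j in arr[i]:
--             lst.append(j)
--
--     return lst[left:right+1]
-- ===== SOURCE B (Python) =====
-- def solution(n, left, right):
--     # value at flat index k of the n*n matrix is max(row, col) + 1 = max(k // n, k % n) + 1;
--     # compute only the requested slice directly, O(right - left) instead of O(n^2).
--     size = max(n, 0) ** 2
--     start, stop, _ = slice(left, right + 1).indices(size)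
--     return [max(divmod(k, n)) + 1 for k in range(start, stop)]
-- ===== Notes on version B (the rewrite author's own statement) =====
-- stated objective: faster
-- what changed: B replaces A's O(n^2) build of the full n-by-n matrix and its flattening by a closed form: each flat index k in the requested slice is computed directly as max(k // n, k % n) + 1, so only the returned elements are produced.
import Mathlib
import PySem

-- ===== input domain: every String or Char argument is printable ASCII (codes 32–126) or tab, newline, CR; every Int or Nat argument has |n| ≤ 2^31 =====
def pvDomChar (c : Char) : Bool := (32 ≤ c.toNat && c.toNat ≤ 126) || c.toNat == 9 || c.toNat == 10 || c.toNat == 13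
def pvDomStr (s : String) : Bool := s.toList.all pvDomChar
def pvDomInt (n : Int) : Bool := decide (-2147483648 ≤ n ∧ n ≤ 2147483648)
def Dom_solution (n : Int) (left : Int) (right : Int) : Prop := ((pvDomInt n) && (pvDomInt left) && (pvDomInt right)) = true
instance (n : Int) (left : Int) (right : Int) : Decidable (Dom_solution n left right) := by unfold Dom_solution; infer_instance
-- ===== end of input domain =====

-- B replaces A's O(n^2) matrix construction + flatten by computing each requested entry
-- directly as max(k // n, k % n) + 1 over the slice's index range (objective: faster).

-- ===== PORT A =====
-- `arr[i][j] = v` for the nonnegative in-range indices A uses (i ∈ [0,n), j ∈ [0,i]):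
-- exact there; Python's negative-index wraparound is never reached by A's loops.
def pvSetAt (m : List (List Int)) (i j : Int) (v : Int) : List (List Int) :=
  m.set i.toNat ((m.getD i.toNat []).set j.toNat v)

def solution (n : Int) (left : Int) (right : Int) : List Int :=
  -- arr = [[0]*n for _ in range(n)]
  let arr0 := (PySem.List.pyRange 0 n 1).map (fun _ => List.replicate n.toNat (0 : Int))
  -- for i in range(n): arr[i][i] = i+1; for j in range(i, -1, -1): arr[i][j] = i+1; arr[j][i] = i+1
  let arr := (PySem.List.pyRange 0 n 1).foldl (fun a i =>
      let a1 := pvSetAt a i i (i + 1)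
      (PySem.List.pyRange i (-1) (-1)).foldl
        (fun b j => pvSetAt (pvSetAt b i j (i + 1)) j i (i + 1)) a1) arr0
  -- lst = []; for i in range(n): for j in arr[i]: lst.append(j)
  -- (arr[i]: i is always in range here, so the `.getD []` default is never used)
  let lst := (PySem.List.pyRange 0 n 1).foldl
      (fun l i => l ++ ((PySem.List.pyGet? arr i).getD [])) []
  -- return lst[left:right+1]
  PySem.List.slice lst (some left) (some (right + 1))

-- ===== PORT B =====
-- exact port of Python's slice(a, b).indices(L) bound computation for step 1
def pvSliceIndex (i L : Int) : Int := if i < 0 then max (i + L) 0 else min i L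

def solution_alt (n : Int) (left : Int) (right : Int) : List Int :=
  let size : Int := (max n 0) ^ 2
  let start := pvSliceIndex left size
  let stop := pvSliceIndex (right + 1) size
  (PySem.List.pyRange start stop 1).map (fun k =>
    max (PySem.Int.floordiv k n) (PySem.Int.mod k n) + 1)

-- ===== PRECONDITION & SPEC =====
def Spec_solution (n : Int) (left : Int) (right : Int) (out : List Int) : Prop := out = solution_alt n left right
instance (n : Int) (left : Int) (right : Int) (out : List Int) : Decidable (Spec_solution n left right out) := by unfold Spec_solution; infer_instance

-- ===== CLAIM (what is proved, stated in full; the proofs are below) =====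
def Claim_equal_solution : Prop := ∀ (n : Int) (left : Int) (right : Int), Dom_solution n left right → Spec_solution n left right (solution n left right)

-- ===== LEMMAS AND PROOFS =====

-- model matrices: N×N grids given by an entry function
def pvMst (N : Nat) (f : Nat → Nat → Int) : List (List Int) :=
  (List.range N).map (fun r => (List.range N).map (f r))

-- entry function after the outer loop has run for i = 0 .. k-1
def pvEntryO (k r c : Nat) : Int :=
  if r < k ∧ c < k then ((max r c : Nat) : Int) + 1 else 0

-- entry function inside outer iteration k, inner loop done down to j = t
def pvEntryI (k t r c : Nat) : Int :=
  if r < k ∧ c < k then ((max r c : Nat) : Int) + 1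
  else if (r = k ∧ t ≤ c ∧ c ≤ k) ∨ (c = k ∧ t ≤ r ∧ r ≤ k) then (k : Int) + 1
  else 0

theorem pvMst_congr {N : Nat} {f g : Nat → Nat → Int}
    (h : ∀ r c, r < N → c < N → f r c = g r c) : pvMst N f = pvMst N g := by
  unfold pvMst
  apply List.map_congr_left
  intro r hr
  apply List.map_congr_left
  intro c hc
  exact h r c (List.mem_range.mp hr) (List.mem_range.mp hc)

theorem pvSetAt_model (N : Nat) (f : Nat → Nat → Int) (i j : Nat) (v : Int)
    (hi : i < N) :
    pvSetAt (pvMst N f) (i : Int) (j : Int) v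
      = pvMst N (fun r c => if r = i ∧ c = j then v else f r c) := by
  unfold pvSetAt pvMst
  simp only [Int.toNat_natCast]
  apply List.ext_getElem
  · simp
  intro r h1 h2
  rw [List.getElem_set]
  by_cases hri : i = r
  · subst hri
    simp only [List.getD_eq_getElem _ _ (by simpa using hi :
      i < ((List.range N).map (fun r => (List.range N).map (f r))).length)]
    simp only [List.getElem_map, List.getElem_range, if_pos trivial, true_and]
    apply List.ext_getElem
    · simp
    intro c h3 h4
    rw [List.getElem_set]
    simp only [List.getElem_map, List.getElem_range]
    by_cases hcj : j = c
    · subst hcj; simp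
    · simp [hcj, Ne.symm hcj]
  · simp only [if_neg hri, List.getElem_map, List.getElem_range]
    apply List.map_congr_left
    intro c hc
    have : ¬ (r = i) := fun h => hri h.symm
    simp [this]

theorem pvDesc_cons (t : Nat) :
    PySem.List.pyRange (t : Int) (-1) (-1)
      = (t : Int) :: PySem.List.pyRange ((t : Int) - 1) (-1) (-1) := by
  simp only [PySem.List.pyRange]
  norm_num
  have ht : (-1:Int) < (t:Int) := by omega
  rw [if_pos ht, List.range_succ_eq_map, List.map_cons, List.map_map]
  have h2 : (if 0 < t then t else 0) = t := by split_ifs <;> omega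
  rw [h2]
  refine congrArg₂ List.cons (by norm_num) ?_
  apply List.map_congr_left
  intro k _
  simp only [Function.comp]
  push_cast
  ring

theorem pvDesc_nil : PySem.List.pyRange (-1) (-1) (-1) = [] := by decide

-- one inner-loop body step: sets arr[k][j] and arr[j][k] to k+1
theorem pvStep (N k j t : Nat) (hk : k < N) (hj : j ≤ k)
    (ht : t = j + 1 ∨ (j = k ∧ t = k)) :
    pvSetAt (pvSetAt (pvMst N (pvEntryI k t)) (k : Int) (j : Int) ((k : Int) + 1)) (j : Int) (k : Int) ((k : Int) + 1)
      = pvMst N (pvEntryI k j) := by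
  have hjN : j < N := lt_of_le_of_lt hj hk
  rw [pvSetAt_model N _ k j _ hk, pvSetAt_model N _ j k _ hjN]
  apply pvMst_congr
  intro r c hr hc
  unfold pvEntryI
  split_ifs <;> omega

theorem pvInnerLoop (N k : Nat) (hk : k < N) :
    ∀ t, t ≤ k →
      List.foldl (fun b j => pvSetAt (pvSetAt b (k : Int) j ((k : Int) + 1)) j (k : Int) ((k : Int) + 1))
        (pvMst N (pvEntryI k (min (t + 1) k))) (PySem.List.pyRange (t : Int) (-1) (-1))
      = pvMst N (pvEntryI k 0) := by
  intro t
  induction t with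
  | zero =>
    intro _
    rw [pvDesc_cons 0]
    have : ((0:Nat):Int) - 1 = -1 := by norm_num
    rw [this, pvDesc_nil]
    simp only [List.foldl_cons, List.foldl_nil]
    apply pvStep N k 0 (min 1 k) hk (Nat.zero_le k)
    omega
  | succ s ih =>
    intro hs
    rw [pvDesc_cons (s+1)]
    have : ((s+1:Nat):Int) - 1 = ((s:Nat):Int) := by push_cast; ring
    rw [this]
    simp only [List.foldl_cons]
    rw [pvStep N k (s+1) (min (s+2) k) hk hs (by omega)]
    have : pvEntryI k (s+1) = pvEntryI k (min (s+1) k) := by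
      rw [Nat.min_eq_left hs]
    rw [this]
    exact ih (Nat.le_of_succ_le hs)

theorem pvRange_nonneg (n : Int) :
    PySem.List.pyRange 0 n 1 = (List.range n.toNat).map (Nat.cast : Nat → Int) := by
  simp only [PySem.List.pyRange]
  norm_num
  have h2 : (if 0 < n then n.toNat else 0) = n.toNat := by split_ifs <;> omega
  rw [h2]

theorem pvOuterLoop (N : Nat) :
    ∀ K, K ≤ N →
    (((List.range K).map (Nat.cast : Nat → Int)).foldl (fun a i =>
        let a1 := pvSetAt a i i (i + 1)
        (PySem.List.pyRange i (-1) (-1)).foldl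
          (fun b j => pvSetAt (pvSetAt b i j (i + 1)) j i (i + 1)) a1)
      (pvMst N (pvEntryO 0)))
    = pvMst N (pvEntryO K) := by
  intro K
  induction K with
  | zero => intro _; rfl
  | succ K ih =>
    intro hK
    rw [List.range_succ, List.map_append, List.foldl_append, ih (by omega)]
    simp only [List.map_cons, List.map_nil, List.foldl_cons, List.foldl_nil]
    have hKN : K < N := by omega
    rw [pvSetAt_model N _ K K _ hKN]
    have e1 : pvMst N (fun r c => if r = K ∧ c = K then (K:Int) + 1 else pvEntryO K r c)
        = pvMst N (pvEntryI K (min (K + 1) K)) := by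
      apply pvMst_congr
      intro r c hr hc
      unfold pvEntryO pvEntryI
      split_ifs <;> omega
    rw [e1, pvInnerLoop N K hKN K (le_refl K)]
    apply pvMst_congr
    intro r c hr hc
    unfold pvEntryO pvEntryI
    split_ifs <;> omega

theorem pvGrid_flatten (N : Nat) (F : Nat → Nat → Int) :
    ∀ m, (List.range m).flatMap (fun r => (List.range N).map (F r))
      = (List.range (m * N)).map (fun k => F (k / N) (k % N)) := by
  intro m
  induction m with
  | zero => simp
  | succ m ih =>
    rw [List.range_succ, List.flatMap_append, ih]
    have hN : (m + 1) * N = m * N + N := by ring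
    rw [hN, List.range_add, List.map_append]
    congr 1
    simp only [List.flatMap_cons, List.flatMap_nil, List.append_nil, List.map_map]
    apply List.map_congr_left
    intro j hj
    have hjN : j < N := List.mem_range.mp hj
    have h1 : (m * N + j) / N = m := by
      rw [Nat.add_comm, Nat.add_mul_div_right _ _ (by omega : 0 < N), Nat.div_eq_of_lt hjN, Nat.zero_add]
    have h2 : (m * N + j) % N = j := by
      rw [Nat.add_comm, Nat.add_mul_mod_self_right, Nat.mod_eq_of_lt hjN]
    simp only [Function.comp]
    rw [h1, h2]

-- A's flat list is max(k/N, k%N) + 1 over range (N*N)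
theorem pvLst_eq (N : Nat) :
    (((List.range N).map (Nat.cast : Nat → Int)).foldl
      (fun l i => l ++ ((PySem.List.pyGet? (pvMst N (pvEntryO N)) i).getD [])) [])
    = (List.range (N * N)).map (fun k => ((max (k / N) (k % N) : Nat) : Int) + 1) := by
  rw [PySem.List.foldl_append_eq_flatMap, List.nil_append, List.flatMap_map]
  have step1 : ∀ r ∈ List.range N,
      ((PySem.List.pyGet? (pvMst N (pvEntryO N)) ((r : Nat) : Int)).getD [])
        = (List.range N).map (fun c => ((max r c : Nat) : Int) + 1) := by
    intro r hr
    have hrN : r < N := List.mem_range.mp hr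
    have : (PySem.List.pyGet? (pvMst N (pvEntryO N)) ((r : Nat) : Int)).getD []
        = PySem.List.pyGetD (pvMst N (pvEntryO N)) ((r : Nat) : Int) [] := rfl
    rw [this, PySem.List.pyGetD_natCast]
    have hlen : r < (pvMst N (pvEntryO N)).length := by simp [pvMst]; omega
    rw [List.getD_eq_getElem _ _ hlen]
    unfold pvMst
    simp only [List.getElem_map, List.getElem_range]
    apply List.map_congr_left
    intro c hc
    have hcN : c < N := List.mem_range.mp hc
    unfold pvEntryO
    rw [if_pos ⟨hrN, hcN⟩]
  calc (List.range N).flatMap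
        (fun r => ((PySem.List.pyGet? (pvMst N (pvEntryO N)) ((r : Nat) : Int)).getD []))
      = (List.range N).flatMap (fun r => (List.range N).map (fun c => ((max r c : Nat) : Int) + 1)) := by
        exact List.flatMap_congr step1
    _ = (List.range (N * N)).map (fun k => ((max (k / N) (k % N) : Nat) : Int) + 1) :=
        pvGrid_flatten N _ N

theorem pvSliceIndex_eq (L : Nat) (i : Int) :
    pvSliceIndex i (L : Int) = ((PySem.List.clampIdx L i : Nat) : Int) := by
  unfold pvSliceIndex PySem.List.clampIdx
  split_ifs <;> omega

theorem solution_spec' (n left right : Int) : solution n left right = solution_alt n left right := by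
  simp only [solution, solution_alt]
  rw [pvRange_nonneg]
  have harr0 : ((List.range n.toNat).map (Nat.cast : Nat → Int)).map
        (fun _ => List.replicate n.toNat (0 : Int)) = pvMst n.toNat (pvEntryO 0) := by
    rw [List.map_map]
    unfold pvMst
    apply List.map_congr_left
    intro r _
    have : (List.range n.toNat).map (pvEntryO 0 r) = (List.range n.toNat).map (fun _ => (0:Int)) := by
      apply List.map_congr_left
      intro c _
      unfold pvEntryO
      rw [if_neg (by omega)]
    rw [this, List.map_const', List.length_range]
    rfl
  rw [harr0, pvOuterLoop n.toNat n.toNat (le_refl _), pvLst_eq n.toNat]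
  have hsz : (max n 0) ^ 2 = ((n.toNat * n.toNat : Nat) : Int) := by
    have h1 : max n 0 = ((n.toNat : Nat) : Int) := by omega
    rw [h1]; push_cast; ring
  rw [hsz, pvSliceIndex_eq (n.toNat * n.toNat) left, pvSliceIndex_eq (n.toNat * n.toNat) (right + 1)]
  rw [PySem.List.pyRange_of_pos _ _ (by norm_num : (0:Int) < 1)]
  set N := n.toNat with hNdef
  set A := PySem.List.clampIdx (N * N) left with hA
  set B := PySem.List.clampIdx (N * N) (right + 1) with hB
  have hBle : B ≤ N * N := PySem.List.clampIdx_le _ _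
  have hAle : A ≤ N * N := PySem.List.clampIdx_le _ _
  have hcount : (if (A : Int) < (B : Int) then (((B : Int) - (A : Int) + 1 - 1) / 1).toNat else 0) = B - A := by
    have h1 : ((B : Int) - (A : Int) + 1 - 1) / 1 = (B : Int) - (A : Int) := by norm_num
    rw [h1]
    split_ifs <;> omega
  rw [hcount]
  simp only [PySem.List.slice, List.length_map, List.length_range]
  rw [← hA, ← hB]
  rw [← List.map_drop, ← List.map_take, List.range_eq_range', List.drop_range']
  rw [List.range'_eq_map_range, ← List.map_take, List.take_range]
  have hmin : min (B - A) (N * N - A) = B - A := by omega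
  rw [hmin, List.map_map, List.map_map]
  apply List.map_congr_left
  intro m hm
  have hmlt : m < B - A := List.mem_range.mp hm
  have hNpos : 0 < N := by
    rcases Nat.eq_zero_or_pos N with h0 | h0
    · exfalso; rw [h0] at hBle; simp at hBle; omega
    · exact h0
  have hn : n = (N : Int) := by omega
  simp only [Function.comp]
  rw [hn]
  have harg : ((A : Int) + 1 * (m : Int)) = (((0 + A * 1 + m : Nat) : Nat) : Int) := by push_cast; ring
  rw [harg, PySem.Int.floordiv_natCast, PySem.Int.mod_natCast, ← Nat.cast_max]

-- ===== VERDICT (by name: the statement is the Claim_ definition above) =====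
theorem solution_spec : Claim_equal_solution := by
  intro n left right _
  unfold Spec_solution
  exact solution_spec' n left right
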